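-- pv_equiv track=rewrite | github.com/niluferbagevi-gif/Sidar | core/rag.py | _collect_bfs
-- ===== SOURCE A (Python) =====
-- from typing import Any, Dict, List, Optional, Set, Tuple
--
-- def _collect_bfs(start: str, adjacency: Dict[str, Set[str]], max_depth: int) -> Dict[str, int]:
--     if start not in adjacency:
--         return {}
--     queue: List[Tuple[str, int]] = [(start, 0)]
--     seen = {start}
--     distances: Dict[str, int] = {}
--     while queue:
--         node_id, depth = queue.pop(0)
--         if depth >= max_depth:
--             continue
--         for neighbor in sorted(adjacency.get(node_id, set())):
--             if neighbor in seen: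
--                 continue
--             seen.add(neighbor)
--             distances[neighbor] = depth + 1
--             queue.append((neighbor, depth + 1))
--     return distances
-- ===== SOURCE B (Python) =====
-- def _collect_bfs(start, adjacency, max_depth):
--     if start not in adjacency:
--         return {}
--     frontier = [start]
--     seen = {start}
--     distances = {}
--     for depth in range(max_depth):
--         if not frontier:
--             break
--         next_frontier = []
--         for node in frontier:
--             for neighbor in sorted(adjacency.get(node, set())):
--                 if neighbor not in seen:
--                     seen.add(neighbor)
--                     distances[neighbor] = depth + 1
--                     next_frontier.append(neighbor)
--         frontier = next_frontier
--     return distances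
-- ===== Notes on version B (the rewrite author's own statement) =====
-- stated objective: alternative
-- what changed: Replaces the single FIFO queue of (node, depth) pairs with queue.pop(0) and a dequeue-time depth guard by a level-synchronous BFS that iterates depth levels with a frontier/next_frontier pair, storing no per-node depth and avoiding pop(0).
import Mathlib
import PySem

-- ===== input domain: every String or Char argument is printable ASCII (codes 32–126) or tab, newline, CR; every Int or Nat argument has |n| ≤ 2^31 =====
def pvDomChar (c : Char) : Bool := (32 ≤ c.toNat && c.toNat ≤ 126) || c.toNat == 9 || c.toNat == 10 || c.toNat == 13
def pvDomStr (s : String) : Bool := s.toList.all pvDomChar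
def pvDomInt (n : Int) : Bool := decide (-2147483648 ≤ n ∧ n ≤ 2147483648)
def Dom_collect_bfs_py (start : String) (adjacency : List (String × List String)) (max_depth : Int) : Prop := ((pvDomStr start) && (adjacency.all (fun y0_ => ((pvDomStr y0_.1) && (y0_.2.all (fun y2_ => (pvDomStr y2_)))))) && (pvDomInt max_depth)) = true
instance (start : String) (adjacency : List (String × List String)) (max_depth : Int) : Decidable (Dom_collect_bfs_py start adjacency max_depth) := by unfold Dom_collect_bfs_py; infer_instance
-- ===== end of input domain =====

-- B replaces A's FIFO queue of (node, depth) pairs (with queue.pop(0) and a dequeue-time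
-- depth guard) by a level-synchronous BFS over a frontier/next-frontier pair; same dict result.

-- Shared bridge for the dict argument: Python dict(pairs) lookup = LAST matching pair.
def pvAdjGet (adjacency : List (String × List String)) (k : String) : List String :=
  match adjacency.reverse.find? (fun p => p.1 == k) with
  | some p => p.2
  | none => []

def pvAdjMem (adjacency : List (String × List String)) (k : String) : Bool :=
  adjacency.any (fun p => p.1 == k)

-- sorted(adjacency.get(node, set())) — appears literally in both Pythons
def pvNbrs (adjacency : List (String × List String)) (node : String) : List String :=
  PySem.List.sorted (pvAdjGet adjacency node) (fun x => x) false

-- ===== PORT A =====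
-- body of A's inner 'for neighbor in sorted(...)' loop; state = (seen, distances, queue-tail)
def pvStepA (d : Int) (st : PySem.Set String × PySem.Dict String Int × List (String × Int)) (n : String) :
    PySem.Set String × PySem.Dict String Int × List (String × Int) :=
  if PySem.Set.contains st.1 n then st
  else (PySem.Set.add st.1 n, st.2.1.insert n (d + 1), st.2.2 ++ [(n, d + 1)])

-- termination measure pieces for A's while loop
def pvU (adjacency : List (String × List String)) : List String := adjacency.flatMap (fun p => p.2)

def pvMeas (adjacency : List (String × List String)) (s : PySem.Set String) (q : List (String × Int)) : Nat :=
  ((PySem.List.dedup (pvU adjacency)).filter (fun u => !(PySem.Set.contains s u))).length + q.length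

theorem pvNbrs_sub (adjacency : List (String × List String)) (node : String) :
    ∀ n ∈ pvNbrs adjacency node, n ∈ pvU adjacency := by
  intro n hn
  rw [pvNbrs, PySem.List.mem_sorted] at hn
  unfold pvAdjGet at hn
  rcases hfind : adjacency.reverse.find? (fun p => p.1 == node) with _ | p
  · rw [hfind] at hn; simp at hn
  · rw [hfind] at hn
    have hp : p ∈ adjacency.reverse := List.mem_of_find?_eq_some hfind
    rw [List.mem_reverse] at hp
    exact List.mem_flatMap.mpr ⟨p, hp, hn⟩

theorem pvFilterNeLen (V : List String) (n : String) (hn : n ∈ V) (hd : V.Nodup) :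
    (V.filter (fun u => !(u == n))).length + 1 ≤ V.length := by
  have h1 : (V.filter (fun u => u == n)).length + (V.filter (fun u => !(u == n))).length = V.length := by
    rw [← List.countP_eq_length_filter, ← List.countP_eq_length_filter]
    have := (List.length_eq_countP_add_countP (l := V) (p := fun u => u == n)).symm
    convert this using 2
    apply List.countP_congr; intro a _; simp
  have h2 : (V.filter (fun u => u == n)).length = 1 := by
    rw [← List.countP_eq_length_filter]
    have : V.countP (fun u => u == n) = V.count n := by simp [List.count]
    rw [this, List.count_eq_one_of_mem hd hn]
  omega

theorem pvFilter_add_lt (U : List String) (hU : U.Nodup) (s : PySem.Set String) (n : String)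
    (hn : n ∈ U) (hns : PySem.Set.contains s n = false) :
    (U.filter (fun u => !(PySem.Set.contains (PySem.Set.add s n) u))).length + 1
      ≤ (U.filter (fun u => !(PySem.Set.contains s u))).length := by
  have hadd : PySem.Set.add s n = s ++ [n] := by unfold PySem.Set.add; rw [hns]; simp
  have hpred : (fun u => !(PySem.Set.contains (PySem.Set.add s n) u))
      = fun u => (!(u == n)) && !(PySem.Set.contains s u) := by
    funext u; rw [hadd]
    by_cases h1 : u ∈ s <;> by_cases h2 : u = n <;> simp [PySem.Set.contains, h1, h2]
  rw [hpred, ← List.filter_filter]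
  apply pvFilterNeLen
  · rw [List.mem_filter]
    refine ⟨hn, ?_⟩
    simp [PySem.Set.contains] at hns ⊢
    exact hns
  · exact hU.filter _

theorem pvFoldA_meas (adjacency : List (String × List String)) (d : Int) :
    ∀ (ns : List String) (s : PySem.Set String) (di : PySem.Dict String Int) (q : List (String × Int)),
      (∀ n ∈ ns, n ∈ pvU adjacency) →
      pvMeas adjacency (ns.foldl (pvStepA d) (s, di, q)).1 (ns.foldl (pvStepA d) (s, di, q)).2.2
        ≤ pvMeas adjacency s q := by
  intro ns
  induction ns with
  | nil => intro s di q _; simp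
  | cons n ns ih =>
    intro s di q h
    simp only [List.foldl_cons]
    by_cases hc : PySem.Set.contains s n = true
    · have hst : pvStepA d (s, di, q) n = (s, di, q) := by
        simp [pvStepA]; simp at hc; exact hc
      rw [hst]; exact ih s di q (fun m hm => h m (List.mem_cons_of_mem _ hm))
    · have hcf : PySem.Set.contains s n = false := by simpa using hc
      have hst : pvStepA d (s, di, q) n
          = (PySem.Set.add s n, di.insert n (d + 1), q ++ [(n, d + 1)]) := by
        unfold pvStepA; rw [hcf]; simp
      rw [hst]
      refine le_trans (ih _ _ _ (fun m hm => h m (List.mem_cons_of_mem _ hm))) ?_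
      have h3 := pvFilter_add_lt (PySem.List.dedup (pvU adjacency)) (PySem.List.nodup_dedup _) s n
        (by rw [PySem.List.mem_dedup]; exact h n List.mem_cons_self) hcf
      simp only [pvMeas, List.length_append, List.length_cons, List.length_nil]
      omega

-- A's while loop
def pvLoopA (adjacency : List (String × List String)) (maxd : Int) :
    List (String × Int) → PySem.Set String → PySem.Dict String Int → PySem.Dict String Int
  | [], _, di => di
  | (node, d) :: rest, s, di =>
    if maxd ≤ d then pvLoopA adjacency maxd rest s di
    else
      let st := (pvNbrs adjacency node).foldl (pvStepA d) (s, di, rest)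
      pvLoopA adjacency maxd st.2.2 st.1 st.2.1
termination_by q s _ => pvMeas adjacency s q
decreasing_by
  · simp [pvMeas]
  · have h := pvFoldA_meas adjacency d (pvNbrs adjacency node) s di rest (pvNbrs_sub adjacency node)
    have h2 : pvMeas adjacency s rest < pvMeas adjacency s ((node, d) :: rest) := by
      simp [pvMeas]
    omega

def collect_bfs_py (start : String) (adjacency : List (String × List String)) (max_depth : Int) : List (String × Int) :=
  if pvAdjMem adjacency start then
    (pvLoopA adjacency max_depth [(start, 0)] (PySem.Set.ofList [start]) PySem.Dict.empty).items
  else []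

-- ===== PORT B =====
-- body of B's inner neighbor loop; state = (next_frontier, seen, distances)
def pvStepB (d : Int) (st : List String × PySem.Set String × PySem.Dict String Int) (n : String) :
    List String × PySem.Set String × PySem.Dict String Int :=
  if PySem.Set.contains st.2.1 n then st
  else (st.1 ++ [n], PySem.Set.add st.2.1 n, st.2.2.insert n (d + 1))

-- one level: expand the whole frontier into (next_frontier, seen, distances)
def pvExpand (adjacency : List (String × List String)) (d : Int) (frontier : List String)
    (s : PySem.Set String) (di : PySem.Dict String Int) :
    List String × PySem.Set String × PySem.Dict String Int :=
  frontier.foldl (fun st node => (pvNbrs adjacency node).foldl (pvStepB d) st) ([], s, di)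

-- B's 'for depth in range(max_depth)' loop with the empty-frontier break
def pvLoopB (adjacency : List (String × List String)) (maxd : Int) (frontier : List String)
    (s : PySem.Set String) (di : PySem.Dict String Int) (depth : Int) : PySem.Dict String Int :=
  if maxd ≤ depth then di
  else if frontier = [] then di
  else
    let st := pvExpand adjacency depth frontier s di
    pvLoopB adjacency maxd st.1 st.2.1 st.2.2 (depth + 1)
termination_by (maxd - depth).toNat
decreasing_by omega

def collect_bfs_py_alt (start : String) (adjacency : List (String × List String)) (max_depth : Int) : List (String × Int) :=
  if pvAdjMem adjacency start then
    (pvLoopB adjacency max_depth [start] (PySem.Set.ofList [start]) PySem.Dict.empty 0).items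
  else []

-- ===== PRECONDITION & SPEC =====
def Spec_collect_bfs_py (start : String) (adjacency : List (String × List String)) (max_depth : Int) (out : List (String × Int)) : Prop := out = collect_bfs_py_alt start adjacency max_depth
instance (start : String) (adjacency : List (String × List String)) (max_depth : Int) (out : List (String × Int)) : Decidable (Spec_collect_bfs_py start adjacency max_depth out) := by unfold Spec_collect_bfs_py; infer_instance

-- ===== CLAIM (what is proved, stated in full; the proofs are below) =====
def Claim_equal_collect_bfs_py : Prop := ∀ (start : String) (adjacency : List (String × List String)) (max_depth : Int), Dom_collect_bfs_py start adjacency max_depth → Spec_collect_bfs_py start adjacency max_depth (collect_bfs_py start adjacency max_depth)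

-- ===== LEMMAS AND PROOFS =====

theorem pvInnerRel (d : Int) :
    ∀ (ns nx0 : List String) (s : PySem.Set String) (di : PySem.Dict String Int) (q0 : List (String × Int)),
      ns.foldl (pvStepA d) (s, di, q0 ++ nx0.map (fun n => (n, d + 1)))
        = ((ns.foldl (pvStepB d) (nx0, s, di)).2.1, (ns.foldl (pvStepB d) (nx0, s, di)).2.2,
           q0 ++ (ns.foldl (pvStepB d) (nx0, s, di)).1.map (fun n => (n, d + 1))) := by
  intro ns
  induction ns with
  | nil => intro nx0 s di q0; simp
  | cons n ns ih =>
    intro nx0 s di q0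
    simp only [List.foldl_cons]
    by_cases hc : PySem.Set.contains s n = true
    · have hA : pvStepA d (s, di, q0 ++ nx0.map (fun n => (n, d + 1))) n
          = (s, di, q0 ++ nx0.map (fun n => (n, d + 1))) := by
        simp [pvStepA]; simp at hc; exact hc
      have hB : pvStepB d (nx0, s, di) n = (nx0, s, di) := by
        simp [pvStepB]; simp at hc; exact hc
      rw [hA, hB]; exact ih nx0 s di q0
    · have hcf : PySem.Set.contains s n = false := by simpa using hc
      have hA : pvStepA d (s, di, q0 ++ nx0.map (fun n => (n, d + 1))) n
          = (PySem.Set.add s n, di.insert n (d + 1),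
             q0 ++ ((nx0 ++ [n]).map (fun n => (n, d + 1)))) := by
        unfold pvStepA; rw [hcf]; simp
      have hB : pvStepB d (nx0, s, di) n
          = (nx0 ++ [n], PySem.Set.add s n, di.insert n (d + 1)) := by
        unfold pvStepB; rw [hcf]; simp
      rw [hA, hB]; exact ih (nx0 ++ [n]) (PySem.Set.add s n) (di.insert n (d + 1)) q0

theorem pvLevelRel (adjacency : List (String × List String)) (maxd d : Int) (hd : ¬ maxd ≤ d) :
    ∀ (f g : List String) (s : PySem.Set String) (di : PySem.Dict String Int),
      pvLoopA adjacency maxd (f.map (fun n => (n, d)) ++ g.map (fun n => (n, d + 1))) s di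
        = pvLoopA adjacency maxd
            ((f.foldl (fun st node => (pvNbrs adjacency node).foldl (pvStepB d) st) (g, s, di)).1.map (fun n => (n, d + 1)))
            (f.foldl (fun st node => (pvNbrs adjacency node).foldl (pvStepB d) st) (g, s, di)).2.1
            (f.foldl (fun st node => (pvNbrs adjacency node).foldl (pvStepB d) st) (g, s, di)).2.2 := by
  intro f
  induction f with
  | nil => intro g s di; simp
  | cons node f ih =>
    intro g s di
    simp only [List.map_cons, List.cons_append, List.foldl_cons]
    rw [pvLoopA]
    rw [if_neg hd]
    have h1 := pvInnerRel d (pvNbrs adjacency node) g s di (f.map (fun n => (n, d)))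
    simp only [h1]
    exact ih ((pvNbrs adjacency node).foldl (pvStepB d) (g, s, di)).1
      ((pvNbrs adjacency node).foldl (pvStepB d) (g, s, di)).2.1
      ((pvNbrs adjacency node).foldl (pvStepB d) (g, s, di)).2.2

theorem pvSkipAll (adjacency : List (String × List String)) (maxd : Int) :
    ∀ (q : List (String × Int)) (s : PySem.Set String) (di : PySem.Dict String Int),
      (∀ p ∈ q, maxd ≤ p.2) → pvLoopA adjacency maxd q s di = di := by
  intro q
  induction q with
  | nil => intro s di _; rw [pvLoopA]
  | cons p q ih =>
    intro s di h
    obtain ⟨n, d⟩ := p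
    rw [pvLoopA, if_pos (h (n, d) List.mem_cons_self)]
    exact ih s di (fun p hp => h p (List.mem_cons_of_mem _ hp))

theorem pvTopRel (adjacency : List (String × List String)) (maxd : Int) :
    ∀ (k : Nat) (d : Int) (f : List String) (s : PySem.Set String) (di : PySem.Dict String Int),
      (maxd - d).toNat = k →
      pvLoopA adjacency maxd (f.map (fun n => (n, d))) s di = pvLoopB adjacency maxd f s di d := by
  intro k
  induction k with
  | zero =>
    intro d f s di hk
    have hd : maxd ≤ d := by omega
    rw [pvLoopB, if_pos hd]
    exact pvSkipAll adjacency maxd _ s di (by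
      intro p hp
      obtain ⟨n, hn, rfl⟩ := List.mem_map.mp hp
      exact hd)
  | succ k ih =>
    intro d f s di hk
    by_cases hd : maxd ≤ d
    · rw [pvLoopB, if_pos hd]
      exact pvSkipAll adjacency maxd _ s di (by
        intro p hp
        obtain ⟨n, hn, rfl⟩ := List.mem_map.mp hp
        exact hd)
    · rw [pvLoopB, if_neg hd]
      by_cases hf : f = []
      · subst hf
        rw [if_pos rfl]
        simp only [List.map_nil]
        rw [pvLoopA]
      · rw [if_neg hf]
        have h1 := pvLevelRel adjacency maxd d hd f [] s di
        simp only [List.map_nil, List.append_nil] at h1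
        rw [h1]
        have hexp : pvExpand adjacency d f s di
            = f.foldl (fun st node => (pvNbrs adjacency node).foldl (pvStepB d) st) ([], s, di) := rfl
        rw [hexp]
        exact ih (d + 1)
          (f.foldl (fun st node => (pvNbrs adjacency node).foldl (pvStepB d) st) ([], s, di)).1
          (f.foldl (fun st node => (pvNbrs adjacency node).foldl (pvStepB d) st) ([], s, di)).2.1
          (f.foldl (fun st node => (pvNbrs adjacency node).foldl (pvStepB d) st) ([], s, di)).2.2
          (by omega)

-- ===== VERDICT (by name: the statement is the Claim_ definition above) =====
theorem collect_bfs_py_spec : Claim_equal_collect_bfs_py := by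
  intro start adjacency max_depth _
  unfold Spec_collect_bfs_py collect_bfs_py collect_bfs_py_alt
  by_cases h : pvAdjMem adjacency start
  · simp only [h, if_true]
    have := pvTopRel adjacency max_depth (max_depth - 0).toNat 0 [start]
      (PySem.Set.ofList [start]) PySem.Dict.empty rfl
    simp only [List.map] at this
    rw [this]
  · simp [h]
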